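-- pv_equiv track=rewrite | github.com/Turkeytray/Klaffen-Lost-Angels-Encoder | secretconverter.py | decode_kla3
-- ===== SOURCE A (Python) =====
-- from math import floor
--
-- def decode_kla3(sentence: str) -> str:
--     sentence = sentence.split()
--     encryptedLevelOne = ''
--     encryptedLevelTwo = ''
--     for i in sentence:
--         firstLetter = i[0]
--         word = i[:0:-1]
--         lastHalf = (firstLetter + word)[floor((len(firstLetter) + len(word))/2):]
--         firstHalf = (firstLetter + word)[:floor((len(firstLetter) + len(word))/2)]
--         encryptedLevelOne += lastHalf + firstHalf + ' '
--     for i in encryptedLevelOne: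
--         number = ord(i) - 1
--         if not chr(number).isspace() and number == 96:
--             number = 122
--         if not chr(number).isspace() and number == 64:
--             number = 90
--         if chr(ord(i)).isspace():
--             letter = ' '
--         else:
--             letter = chr(number)
--         encryptedLevelTwo += letter
--     return encryptedLevelTwo
-- ===== SOURCE B (Python) =====
-- def decode_kla3(sentence: str) -> str:
--     # Closed-form index permutation: rotated word position j holds original char
--     # w[(-(j + n//2)) % n]; decode it arithmetically, no reversal/slicing/buffers.
--     def dec(c):
--         v = ord(c) - 1
--         if v == 96:
--             return 'z'
--         if v == 64:
--             return 'Z'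
--         return chr(v)
--
--     out = []
--     for w in sentence.split():
--         n = len(w)
--         h = n // 2
--         out.append(''.join(dec(w[(-(j + h)) % n]) for j in range(n)))
--         out.append(' ')
--     return ''.join(out)
-- ===== Notes on version B (the rewrite author's own statement) =====
-- stated objective: alternative
-- what changed: B computes each output character directly by a closed-form index permutation w[(-(j + n//2)) % n] over range(n) per word, instead of A's staged pipeline that materialises the reversed-and-halves-swapped word, buffers the whole intermediate string, and then re-scans it character by character with isspace-guarded wrap checks.
import Mathlib
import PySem

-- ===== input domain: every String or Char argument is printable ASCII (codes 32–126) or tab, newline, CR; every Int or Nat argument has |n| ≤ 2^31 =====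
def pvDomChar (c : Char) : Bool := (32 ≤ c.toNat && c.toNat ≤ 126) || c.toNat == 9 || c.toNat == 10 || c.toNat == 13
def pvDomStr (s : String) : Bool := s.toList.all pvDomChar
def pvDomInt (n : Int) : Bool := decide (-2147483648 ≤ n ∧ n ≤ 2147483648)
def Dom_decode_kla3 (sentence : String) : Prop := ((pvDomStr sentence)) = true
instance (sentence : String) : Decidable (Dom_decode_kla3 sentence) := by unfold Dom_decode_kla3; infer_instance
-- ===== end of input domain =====

-- B replaces A's build-then-rescan pipeline (reverse, slice into halves, swap, buffer the whole
-- intermediate string, then re-scan it with isspace-guarded wrap checks) by a closed-form index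
-- permutation: output position j of a word of length n holds dec(w[(-(j + n//2)) % n]); no speed claim.

-- ===== PORT A =====
-- per-character body of A's second loop, verbatim (chr(ord(i)) = i itself; Char.ofNat is chr, exact
-- since every code reached here lies in [0, 0x110000))
def pvStepA (c : Char) : Char :=
  let number : Int := (c.toNat : Int) - 1
  let number := if !(PySem.Chars.isspace (Char.ofNat number.toNat)) && number == 96 then 122 else number
  let number := if !(PySem.Chars.isspace (Char.ofNat number.toNat)) && number == 64 then 90 else number
  if PySem.Chars.isspace c then ' ' else Char.ofNat number.toNat

def decode_kla3 (sentence : String) : String :=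
  let sentenceW : List String := PySem.Str.split₀ sentence
  -- first loop: build encryptedLevelOne word by word
  let encryptedLevelOne : List Char :=
    sentenceW.foldl (fun acc i =>
      -- i[0]: split() only yields nonempty words, so the index never raises; `.elim []` is unreachable
      let firstLetter : List Char := (PySem.Str.pyGet? i 0).elim [] (fun c => [c])
      -- i[:0:-1]; step -1 ≠ 0, so slice? never returns none
      let word : List Char := (PySem.List.slice? i.toList none (some 0) (-1)).getD []
      -- floor((len+len)/2): true division then floor = floordiv on these nonnegative ints (exact)
      let h : Int := PySem.Int.floordiv ((firstLetter.length : Int) + (word.length : Int)) 2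
      let lastHalf := PySem.List.slice (firstLetter ++ word) (some h) none
      let firstHalf := PySem.List.slice (firstLetter ++ word) none (some h)
      acc ++ (lastHalf ++ firstHalf ++ [' '])) []
  -- second loop: shift every character of encryptedLevelOne
  let encryptedLevelTwo : List Char :=
    encryptedLevelOne.foldl (fun acc c => acc ++ [pvStepA c]) []
  String.ofList encryptedLevelTwo

-- ===== PORT B =====
-- Source B's dec helper (only ever applied to non-space word characters)
def pvDecB (c : Char) : Char :=
  let v : Int := (c.toNat : Int) - 1
  if v == 96 then 'z'
  else if v == 64 then 'Z'
  else Char.ofNat v.toNat  -- chr(v), exact: every code reached here lies in [0, 0x110000)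

def decode_kla3_alt (sentence : String) : String :=
  let out : List (List Char) :=
    (PySem.Str.split₀ sentence).foldl (fun acc w =>
      let wl := w.toList
      let n : Int := (wl.length : Int)
      let h : Int := PySem.Int.floordiv n 2
      -- ''.join(dec(w[(-(j + h)) % n]) for j in range(n)); the index is always in [0, n),
      -- so the `.getD ' '` default is unreachable
      let wordOut : List Char :=
        (List.range wl.length).map (fun (j : Nat) =>
          pvDecB ((PySem.List.pyGet? wl (PySem.Int.mod (-(((j : Int)) + h)) n)).getD ' '))
      acc ++ [wordOut, [' ']]) []
  String.ofList out.flatten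

-- ===== PRECONDITION & SPEC =====
def Spec_decode_kla3 (sentence : String) (out : String) : Prop := out = decode_kla3_alt sentence
instance (sentence : String) (out : String) : Decidable (Spec_decode_kla3 sentence out) := by unfold Spec_decode_kla3; infer_instance

-- ===== CLAIM (what is proved, stated in full; the proofs are below) =====
def Claim_equal_decode_kla3 : Prop := ∀ (sentence : String), Dom_decode_kla3 sentence → Spec_decode_kla3 sentence (decode_kla3 sentence)

-- ===== LEMMAS AND PROOFS =====

-- the two per-character steps agree on every non-whitespace char
lemma step_eq (c : Char) (h : PySem.Chars.isspace c = false) :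
    pvStepA c = pvDecB c := by
  simp only [pvStepA, pvDecB, h, Bool.false_eq_true, if_false]
  by_cases h96 : (c.toNat : Int) - 1 = 96
  · simp [h96]; decide
  · by_cases h64 : (c.toNat : Int) - 1 = 64
    · simp [h64]; decide
    · simp [h96, h64]

-- every char of every word produced by split₀ is non-whitespace
lemma split₀_go_not_space (s : List Char) (cur : List Char) (acc : List (List Char))
    (hcur : ∀ c ∈ cur, PySem.Chars.isspace c = false)
    (hacc : ∀ w ∈ acc, ∀ c ∈ w, PySem.Chars.isspace c = false) :
    ∀ w ∈ PySem.Chars.split₀.go s cur acc, ∀ c ∈ w, PySem.Chars.isspace c = false := by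
  induction s generalizing cur acc with
  | nil =>
      intro w hw
      by_cases hc : cur.isEmpty
      · simp only [PySem.Chars.split₀.go, hc, if_true, List.mem_reverse] at hw
        exact hacc w hw
      · simp only [PySem.Chars.split₀.go, hc, Bool.false_eq_true, if_false] at hw
        rw [List.mem_reverse, List.mem_cons] at hw
        rcases hw with rfl | hw
        · intro c hc'; exact hcur c (List.mem_reverse.mp hc')
        · exact hacc w hw
  | cons a rest ih =>
      intro w hw
      by_cases hs : PySem.Chars.isspace a
      · by_cases hc : cur.isEmpty
        · simp only [PySem.Chars.split₀.go, hs, hc, if_true] at hw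
          exact ih [] acc (by simp) hacc w hw
        · simp only [PySem.Chars.split₀.go, hs, hc, Bool.false_eq_true, if_true, if_false] at hw
          refine ih [] (cur.reverse :: acc) (by simp) ?_ w hw
          intro w' hw'
          rcases List.mem_cons.mp hw' with rfl | hw'
          · intro c hc'; exact hcur c (List.mem_reverse.mp hc')
          · exact hacc w' hw'
      · simp only [PySem.Chars.split₀.go, hs, Bool.false_eq_true, if_false] at hw
        refine ih (a :: cur) acc ?_ hacc w hw
        intro c hc'
        rcases List.mem_cons.mp hc' with rfl | hc'
        · exact Bool.eq_false_iff.mpr hs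
        · exact hcur c hc'

lemma split₀_not_space (s : List Char) :
    ∀ w ∈ PySem.Chars.split₀ s, ∀ c ∈ w, PySem.Chars.isspace c = false := by
  unfold PySem.Chars.split₀
  exact split₀_go_not_space s [] [] (by simp) (by simp)

-- xs[:0:-1] is reverse (tail xs), for every list
lemma slice?_rev_tail (xs : List Char) :
    PySem.List.slice? xs none (some 0) (-1) = some xs.tail.reverse := by
  cases xs with
  | nil => simp [PySem.List.slice?, PySem.List.sliceIndices]
  | cons x t =>
      simp only [PySem.List.slice?, PySem.List.sliceIndices]
      norm_num
      cases t with
      | nil => simp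
      | cons a s =>
          rw [if_pos (by simp : 0 < (a :: s).length)]
          apply List.ext_getElem (by simp)
          intro i hi1 hi2
          simp only [List.getElem_map, List.getElem_range, List.getElem_reverse]
          have hm : ((((a :: s).length : Int)) + -(i : Int)).toNat = ((a :: s).length - 1 - i) + 1 := by
            simp at hi1 ⊢; omega
          rw [getElem_congr rfl hm (by simp), List.getElem_cons_succ]

-- (-a) % n on Int (Python's % for a positive divisor) as a Nat formula
lemma neg_mod_nat (a n : Nat) (hn : 0 < n) :
    (-(a : Int)) % (n : Int) = (((n - a % n) % n : Nat) : Int) := by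
  have hmd : ((a % n : Nat) : Int) + (n : Int) * ((a / n : Nat) : Int) = a := by
    exact_mod_cast Nat.mod_add_div a n
  have h1 : (-(a : Int)) = (-((a % n : Nat) : Int)) + (-((a / n : Nat) : Int)) * n := by linarith
  rw [h1, Int.add_mul_emod_self_right]
  have hk : a % n < n := Nat.mod_lt _ hn
  clear hmd h1
  rcases Nat.eq_zero_or_pos (a % n) with h0 | hpos
  · simp [h0]
  · have h2 : (-((a % n : Nat) : Int)) % n = ((n : Int) - ((a % n : Nat) : Int)) % n := by
      simp
    rw [h2, Int.emod_eq_of_lt (a := (n : Int) - ((a % n : Nat) : Int)) (b := (n : Int))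
        (by omega) (by omega),
      Nat.mod_eq_of_lt (show n - a % n < n by omega)]
    omega

-- lists of lists: flatten after flatMap
lemma flatten_flatMap_pv {α : Type} (l : List α) (f : α → List (List Char)) :
    (l.flatMap f).flatten = l.flatMap (fun x => (f x).flatten) := by
  induction l with
  | nil => simp
  | cons a t ih => simp [ih]

-- per-word equality: A's reversed-halves-swapped word, shifted char by char,
-- equals B's index-permutation word (plus the shared ' ' separator)
lemma word_eq (w : String) (hws : ∀ c ∈ w.toList, PySem.Chars.isspace c = false) :
    List.map pvStepA
      ((PySem.List.slice
          (((PySem.Str.pyGet? w 0).elim [] (fun c => [c]))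
            ++ ((PySem.List.slice? w.toList none (some 0) (-1)).getD []))
          (some (PySem.Int.floordiv
            (((((PySem.Str.pyGet? w 0).elim [] (fun c => [c])).length : Int))
              + ((((PySem.List.slice? w.toList none (some 0) (-1)).getD []).length : Int))) 2)) none)
        ++ (PySem.List.slice
          (((PySem.Str.pyGet? w 0).elim [] (fun c => [c]))
            ++ ((PySem.List.slice? w.toList none (some 0) (-1)).getD []))
          none (some (PySem.Int.floordiv
            (((((PySem.Str.pyGet? w 0).elim [] (fun c => [c])).length : Int))
              + ((((PySem.List.slice? w.toList none (some 0) (-1)).getD []).length : Int))) 2)))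
        ++ [' '])
    = ((List.range w.toList.length).map (fun (j : Nat) =>
          pvDecB ((PySem.List.pyGet? w.toList
            (PySem.Int.mod (-(((j : Int)) + PySem.Int.floordiv ((w.toList.length : Int)) 2))
              ((w.toList.length : Int)))).getD ' ')))
        ++ [' '] := by
  rw [slice?_rev_tail]
  cases hl : w.toList with
  | nil =>
      simp [PySem.Str.pyGet?, hl, PySem.List.pyGet?, PySem.List.pyIdx?, PySem.List.slice]
      decide
  | cons c t =>
      have hget : PySem.Str.pyGet? w 0 = some c := by
        simp [PySem.Str.pyGet?, hl]
      set n : Nat := (c :: t).length with hn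
      have hnpos : 0 < n := by simp [hn]
      set hN : Nat := n / 2 with hhN
      have hhle : hN ≤ n := Nat.div_le_self _ _
      have hcomb : ((some c).elim [] (fun c => [c])) ++ (some (c :: t).tail.reverse).getD []
          = c :: t.reverse := by simp
      rw [hget, hcomb]
      have hlenc : (c :: t.reverse).length = n := by simp [hn]
      have hargs : ((((some c).elim [] (fun c => [c])).length : Int))
          + (((some (c :: t).tail.reverse).getD []).length : Int) = (n : Int) := by
        simp [hn]; ring
      rw [hargs]
      have hfd : PySem.Int.floordiv (n : Int) 2 = ((hN : Nat) : Int) := by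
        rw [hhN]; exact_mod_cast PySem.Int.floordiv_natCast n 2
      rw [hfd]
      rw [PySem.List.slice_from_natCast, PySem.List.slice_to_natCast]
      rw [← List.rotate_eq_drop_append_take (by rw [hlenc]; exact hhle)]
      rw [List.map_append]
      congr 1
      · -- the rotated word, char-shifted, is B's index-permutation word
        apply List.ext_getElem (by simp [hn])
        intro j hj1 hj2
        have hj1' : j ≤ t.length := by simpa using hj1
        have hjn : j < n := by simp [hn]; omega
        simp only [List.getElem_map, List.getElem_range]
        rw [List.getElem_rotate]
        have hmodpos : (0 : Int) < ((c :: t).length : Int) := by exact_mod_cast hnpos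
        have hcast : (-((j : Int) + ((hN : Nat) : Int))) = (-(((j + hN : Nat) : Int))) := by
          push_cast; ring
        rw [PySem.Int.mod_eq_emod_of_pos hmodpos, hcast, ← hn, neg_mod_nat _ _ hnpos]
        rw [PySem.List.pyGet?_natCast]
        set k : Nat := (j + hN) % n with hk
        have hkn : k < n := Nat.mod_lt _ hnpos
        have hmn : (n - k) % n < n := Nat.mod_lt _ hnpos
        clear_value k
        rw [List.getElem?_eq_getElem (by rw [← hn]; exact hmn), Option.getD_some]
        simp only [hlenc]
        -- the rotated word's char at j IS the original char at (n - k) % n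
        have hchar' : (c :: t.reverse)[k]? = (c :: t)[(n - k) % n]? := by
          rcases Nat.eq_zero_or_pos k with h0 | hkpos
          · have hm0 : (n - k) % n = 0 := by rw [h0]; simp
            rw [hm0, h0]
            simp
          · have hm : (n - k) % n = n - k := Nat.mod_eq_of_lt (by omega)
            have hk1 : k - 1 < t.length := by simp [hn] at hkn; omega
            rw [hm, show n - k = (n - k - 1) + 1 by omega, show k = (k - 1) + 1 by omega]
            rw [List.getElem?_cons_succ, List.getElem?_cons_succ]
            rw [List.getElem?_reverse hk1]
            congr 1
            simp only [hn] at hkn ⊢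
            simp only [List.length_cons] at hkn ⊢
            omega
        have hb1 : (j + hN) % n < (c :: t.reverse).length := by rw [hlenc]; exact hk ▸ hkn
        have hb2 : (n - k) % n < (c :: t).length := by rw [← hn]; exact hmn
        have hchar : (c :: t.reverse)[(j + hN) % n]'hb1 = (c :: t)[(n - k) % n]'hb2 := by
          have ho : (c :: t.reverse)[(j + hN) % n]? = (c :: t)[(n - k) % n]? := by
            rw [← hk]; exact hchar'
          rw [List.getElem?_eq_getElem hb1, List.getElem?_eq_getElem hb2] at ho
          exact Option.some.inj ho
        rw [hchar]
        exact step_eq _ (hws _ (by rw [hl]; exact List.getElem_mem _))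

-- ===== VERDICT (by name: the statement is the Claim_ definition above) =====
set_option maxHeartbeats 1000000 in
theorem decode_kla3_spec : Claim_equal_decode_kla3 := by
  intro sentence _hdom
  unfold Spec_decode_kla3 decode_kla3 decode_kla3_alt
  simp only [PySem.List.foldl_append_eq_flatMap, List.nil_append]
  rw [show (fun (x : Char) => [pvStepA x]) = (fun x => [pvStepA x]) from rfl]
  rw [← List.map_eq_flatMap, List.map_flatMap]
  rw [flatten_flatMap_pv]
  congr 1
  apply List.flatMap_congr
  intro w hw
  have hmem : w.toList ∈ PySem.Chars.split₀ sentence.toList := by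
    rw [← PySem.Str.split₀_map_toList]
    exact List.mem_map_of_mem hw
  have hws : ∀ c ∈ w.toList, PySem.Chars.isspace c = false :=
    split₀_not_space sentence.toList w.toList hmem
  simpa using word_eq w hws
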